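-- pv_equiv track=rewrite | github.com/stretchyDawg/SI_Sessions_123 | my_stuff/my_tests/my_test3.py | job_assignment
-- ===== SOURCE A (Python) =====
-- def job_assignment(workers):
--     """
--     COMMUNE JOB ASSIGNMENT
--     Given this collection of tuples, return a dictionary
--     representing workers in this form:
--     {proficiency : collection of workers (as tuples)}
--     """
--     job_dict = dict()
--
--     for worker in workers:
--         proficiency = worker[2]
--         if proficiency in job_dict:
--             job_dict[proficiency].add(worker)
--         else:
--             job_dict[proficiency] = set()
--             job_dict[proficiency].add(worker)
--
--     return job_dict
-- ===== SOURCE B (Python) =====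
-- def job_assignment(workers):
--     # Two-pass grouping: collect the distinct proficiencies first (in first-occurrence
--     # order), then build each group with one comprehension scan per key.
--     keys = dict.fromkeys(w[2] for w in workers)
--     return {p: {w for w in workers if w[2] == p} for p in keys}
-- ===== Notes on version B (the rewrite author's own statement) =====
-- stated objective: alternative
-- what changed: Replaces the single accumulating dict-of-sets pass with a two-pass scheme: first dedup the proficiencies, then one filtering scan of workers per distinct proficiency via a dict comprehension.
import Mathlib
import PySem

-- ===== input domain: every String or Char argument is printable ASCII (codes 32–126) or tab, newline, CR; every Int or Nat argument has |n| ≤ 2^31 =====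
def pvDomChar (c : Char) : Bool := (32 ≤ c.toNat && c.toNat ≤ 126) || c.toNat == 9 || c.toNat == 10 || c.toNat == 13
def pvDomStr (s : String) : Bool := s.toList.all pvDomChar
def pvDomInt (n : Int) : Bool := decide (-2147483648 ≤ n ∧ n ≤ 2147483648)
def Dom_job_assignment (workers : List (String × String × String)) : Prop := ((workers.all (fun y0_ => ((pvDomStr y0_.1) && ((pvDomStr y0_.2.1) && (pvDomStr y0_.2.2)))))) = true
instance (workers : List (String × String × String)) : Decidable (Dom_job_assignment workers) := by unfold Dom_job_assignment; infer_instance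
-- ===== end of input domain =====

-- B groups by a dedup-of-keys pass plus one filtering scan per distinct proficiency,
-- instead of A's single accumulating dict-of-sets pass; same return value (alternative, not faster).

-- ===== PORT A =====
def job_assignment (workers : List (String × String × String)) : List (String × List (String × String × String)) :=
  (workers.foldl (fun job_dict worker =>
      let proficiency := worker.2.2
      if job_dict.contains proficiency then
        job_dict.modify proficiency PySem.Set.empty (fun s => PySem.Set.add s worker)
      else
        -- job_dict[proficiency] = set(); job_dict[proficiency].add(worker)
        (job_dict.insert proficiency PySem.Set.empty).modify proficiency PySem.Set.empty
          (fun s => PySem.Set.add s worker))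
    PySem.Dict.empty).items

-- ===== PORT B =====
-- dict.fromkeys over the proficiencies = PySem.List.dedup; the dict comprehension over these
-- (distinct) keys builds the items list directly, one filter scan of workers per key.
def job_assignment_alt (workers : List (String × String × String)) : List (String × List (String × String × String)) :=
  (PySem.List.dedup (workers.map (fun w => w.2.2))).map
    (fun p => (p, PySem.Set.ofList (workers.filter (fun w => w.2.2 == p))))

-- ===== PRECONDITION & SPEC =====
def Spec_job_assignment (workers : List (String × String × String)) (out : List (String × List (String × String × String))) : Prop := out = job_assignment_alt workers
instance (workers : List (String × String × String)) (out : List (String × List (String × String × String))) : Decidable (Spec_job_assignment workers out) := by unfold Spec_job_assignment; infer_instance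

-- ===== CLAIM (what is proved, stated in full; the proofs are below) =====
def Claim_equal_job_assignment : Prop := ∀ (workers : List (String × String × String)), Dom_job_assignment workers → Spec_job_assignment workers (job_assignment workers)

-- ===== LEMMAS AND PROOFS =====

-- A's loop body equals a single modify (insert-then-modify on a fresh key appends the same item).
theorem step_eq_modify (d : PySem.Dict String (List (String × String × String)))
    (w : String × String × String) :
    (if d.contains w.2.2 then
        d.modify w.2.2 PySem.Set.empty (fun s => PySem.Set.add s w)
      else
        (d.insert w.2.2 PySem.Set.empty).modify w.2.2 PySem.Set.empty
          (fun s => PySem.Set.add s w))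
      = d.modify w.2.2 PySem.Set.empty (fun s => PySem.Set.add s w) := by
  by_cases hc : d.contains w.2.2
  · rw [if_pos hc]
  · rw [if_neg hc]
    simp only [PySem.Dict.modify, PySem.Dict.getD_insert_self, PySem.Dict.insert_insert_self,
      PySem.Dict.getD_of_not_contains d _ (by simpa using hc)]

-- the value accumulated at key p by the modify loop
theorem getD_fold_modify (l : List (String × String × String))
    (d : PySem.Dict String (List (String × String × String))) (p : String) :
    (l.foldl (fun d w => d.modify w.2.2 PySem.Set.empty (fun s => PySem.Set.add s w)) d).getD p PySem.Set.empty
      = (l.filter (fun w => w.2.2 == p)).foldl PySem.Set.add (d.getD p PySem.Set.empty) := by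
  induction l generalizing d with
  | nil => rfl
  | cons w l ih =>
    simp only [List.foldl_cons, List.filter_cons]
    rw [ih]
    by_cases h : w.2.2 = p
    · subst h
      simp [PySem.Dict.getD_modify_self]
    · have hb : (w.2.2 == p) = false := by simp [h]
      rw [hb, PySem.Dict.getD_modify_of_ne d _ _ (fun e => h e.symm)]
      simp

theorem job_assignment_spec : Claim_equal_job_assignment := by
  intro workers _
  unfold Spec_job_assignment job_assignment job_assignment_alt
  have hstep : ∀ (d : PySem.Dict String (List (String × String × String))),
      workers.foldl (fun job_dict worker =>
        let proficiency := worker.2.2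
        if job_dict.contains proficiency then
          job_dict.modify proficiency PySem.Set.empty (fun s => PySem.Set.add s worker)
        else
          (job_dict.insert proficiency PySem.Set.empty).modify proficiency PySem.Set.empty
            (fun s => PySem.Set.add s worker)) d
      = workers.foldl (fun d w => d.modify w.2.2 PySem.Set.empty (fun s => PySem.Set.add s w)) d := by
    intro d
    induction workers generalizing d with
    | nil => rfl
    | cons w l ih => simp only [step_eq_modify]
  rw [hstep]
  set D := workers.foldl (fun d w => d.modify w.2.2 PySem.Set.empty (fun s => PySem.Set.add s w)) PySem.Dict.empty with hD
  have hnd : D.keys.Nodup := by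
    rw [hD]
    exact PySem.Dict.nodup_keys_foldl_modify_key workers (fun w => w.2.2) _ _ _ PySem.Dict.nodup_keys_empty
  have hkeys : D.keys = PySem.List.dedup (workers.map (fun w => w.2.2)) := by
    rw [hD, PySem.Dict.keys_foldl_modify_key]
    simp [PySem.Dict.keys_empty, PySem.Set.update, PySem.List.dedup_eq_ofList, PySem.Set.ofList_eq_foldl]
  rw [PySem.Dict.items_eq_map_keys D hnd PySem.Set.empty, hkeys]
  refine List.map_congr_left ?_
  intro p _
  rw [hD, getD_fold_modify]
  simp [PySem.Dict.getD_empty, PySem.Set.ofList_eq_foldl, PySem.Set.empty]
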